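-- pv_equiv track=rewrite | github.com/Sgzhengg/deepdoc-project | backend/retrieval/table_extractor.py | _merge_all_chunks
-- ===== SOURCE A (Python) =====
-- from typing import List, Dict, Any, Tuple
--
-- def _merge_all_chunks(chunks: List[Dict]) -> str:
--     """合并所有片段（未检测到表格结构时）"""
--     all_text = []
--     seen_lines = set()
--
--     for chunk in chunks:
--         text = chunk.get('text', '')
--         lines = text.split('\n')
--
--         for line in lines:
--             line_stripped = line.strip()
--             if line_stripped and line_stripped not in seen_lines:
--                 seen_lines.add(line_stripped)
--                 all_text.append(line_stripped)
--
--     return '\n'.join(all_text)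
-- ===== SOURCE B (Python) =====
-- from typing import List, Dict
--
-- def _merge_all_chunks(chunks: List[Dict]) -> str:
--     """Merge all chunks (no table structure detected)."""
--     pending = [s for chunk in chunks
--                for s in (ln.strip() for ln in chunk.get('text', '').split('\n')) if s]
--     out = []
--     while pending:
--         head = pending[0]
--         out.append(head)
--         pending = [l for l in pending[1:] if l != head]
--     return '\n'.join(out)
-- ===== Notes on version B (the rewrite author's own statement) =====
-- stated objective: alternative
-- what changed: Replaces A's single pass with a running seen-set and membership branch by a selection-by-removal dedup: gather all stripped non-empty lines once, then repeatedly emit the first pending line and delete all its later copies from the pending list; no seen-set or membership test remains.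
import Mathlib
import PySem

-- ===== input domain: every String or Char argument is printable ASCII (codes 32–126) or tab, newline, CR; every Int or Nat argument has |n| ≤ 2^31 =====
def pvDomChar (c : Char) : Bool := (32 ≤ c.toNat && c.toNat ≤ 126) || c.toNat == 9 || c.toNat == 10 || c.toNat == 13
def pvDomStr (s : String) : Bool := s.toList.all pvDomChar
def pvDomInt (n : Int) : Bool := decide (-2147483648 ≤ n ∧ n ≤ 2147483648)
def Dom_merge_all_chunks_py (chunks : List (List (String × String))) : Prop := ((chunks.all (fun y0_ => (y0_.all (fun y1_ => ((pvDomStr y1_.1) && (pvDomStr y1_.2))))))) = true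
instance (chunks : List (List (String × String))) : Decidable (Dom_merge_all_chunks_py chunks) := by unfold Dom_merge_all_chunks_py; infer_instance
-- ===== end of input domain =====

-- B replaces A's single pass with a running seen-set by selection-by-removal dedup:
-- emit the first pending line, delete its later copies, repeat; same result, no set.

-- text.split('\n'): PySem.Str.split? is none only for sep = "", so with sep "\n" the getD is exact
def pySplitNl (text : String) : List String := (PySem.Str.split? text "\n").getD []

-- ===== PORT A =====
-- the body of A's inner 'for line in lines' loop; state = (seen_lines, all_text)
def mergeLineStep (st : PySem.Set String × List String) (line : String) :
    PySem.Set String × List String :=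
  let s := PySem.Str.strip line
  if s ≠ "" && !(PySem.Set.contains st.1 s) then (PySem.Set.add st.1 s, st.2 ++ [s]) else st

def merge_all_chunks_py (chunks : List (List (String × String))) : String :=
  let st := chunks.foldl (fun st chunk =>
    let text := (PySem.Dict.ofList chunk).getD "text" ""
    let lines := pySplitNl text
    lines.foldl mergeLineStep st) ((PySem.Set.empty : PySem.Set String), ([] : List String))
  PySem.Str.join "\n" st.2

-- ===== PORT B =====
-- Source B's while loop: emit pending[0], drop its later copies from the rest, repeat
def dedupRemove : List String → List String
  | [] => []
  | h :: t => h :: dedupRemove (t.filter (fun x => x ≠ h))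
termination_by l => l.length
decreasing_by simpa using Nat.lt_succ_of_le (le_trans (List.length_filter_le _ _) (by simp))

def merge_all_chunks_py_alt (chunks : List (List (String × String))) : String :=
  let pending := chunks.flatMap (fun chunk =>
    ((pySplitNl ((PySem.Dict.ofList chunk).getD "text" "")).map
        PySem.Str.strip).filter (fun s => s ≠ ""))
  PySem.Str.join "\n" (dedupRemove pending)

-- ===== PRECONDITION & SPEC =====
def Spec_merge_all_chunks_py (chunks : List (List (String × String))) (out : String) : Prop := out = merge_all_chunks_py_alt chunks
instance (chunks : List (List (String × String))) (out : String) : Decidable (Spec_merge_all_chunks_py chunks out) := by unfold Spec_merge_all_chunks_py; infer_instance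

-- ===== CLAIM (what is proved, stated in full; the proofs are below) =====
def Claim_equal_merge_all_chunks_py : Prop := ∀ (chunks : List (List (String × String))), Dom_merge_all_chunks_py chunks → Spec_merge_all_chunks_py chunks (merge_all_chunks_py chunks)

-- ===== LEMMAS AND PROOFS =====

-- A's seen-set and output list stay equal: the line loop run from a duplicated state
-- (S, S) yields (update S F, update S F), F the stripped non-empty lines of the chunk.
theorem foldl_mergeLineStep (L : List String) (S : PySem.Set String) :
    L.foldl mergeLineStep (S, S) =
      (PySem.Set.update S ((L.map PySem.Str.strip).filter (fun s => s ≠ "")),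
       PySem.Set.update S ((L.map PySem.Str.strip).filter (fun s => s ≠ ""))) := by
  induction L generalizing S with
  | nil => simp [PySem.Set.update]
  | cons l L ih =>
    simp only [List.foldl_cons, List.map_cons, List.filter_cons]
    by_cases hs : PySem.Str.strip l = ""
    · rw [show mergeLineStep (S, S) l = (S, S) from by simp [mergeLineStep, hs]]
      rw [if_neg (by simp [hs])]
      exact ih S
    · by_cases hm : PySem.Str.strip l ∈ S
      · have hc : PySem.Set.contains S (PySem.Str.strip l) = true := by
          simpa [PySem.Set.contains] using hm
        rw [show mergeLineStep (S, S) l = (S, S) from by simp [mergeLineStep, hm]]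
        rw [if_pos (by simp [hs]), ih S]
        have h1 : PySem.Set.update S (PySem.Str.strip l ::
            ((L.map PySem.Str.strip).filter (fun s => s ≠ ""))) =
            PySem.Set.update (PySem.Set.add S (PySem.Str.strip l))
              ((L.map PySem.Str.strip).filter (fun s => s ≠ "")) := rfl
        rw [h1, PySem.Set.add_of_mem hm]
      · have hc : PySem.Set.contains S (PySem.Str.strip l) = false := by
          simpa [PySem.Set.contains] using hm
        rw [show mergeLineStep (S, S) l =
            (PySem.Set.add S (PySem.Str.strip l), PySem.Set.add S (PySem.Str.strip l)) from by
          simp [mergeLineStep, hs, hm]]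
        rw [if_pos (by simp [hs])]
        exact ih (PySem.Set.add S (PySem.Str.strip l))

-- A's whole chunk loop from (S, S): the same, over the flattened filtered lines.
theorem foldl_chunks (chunks : List (List (String × String))) (S : PySem.Set String) :
    chunks.foldl (fun st chunk =>
        (pySplitNl ((PySem.Dict.ofList chunk).getD "text" "")).foldl mergeLineStep st) (S, S) =
      (PySem.Set.update S (chunks.flatMap (fun chunk =>
          (((pySplitNl ((PySem.Dict.ofList chunk).getD "text" "")).map
              PySem.Str.strip).filter (fun s => s ≠ "")))),
       PySem.Set.update S (chunks.flatMap (fun chunk =>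
          (((pySplitNl ((PySem.Dict.ofList chunk).getD "text" "")).map
              PySem.Str.strip).filter (fun s => s ≠ ""))))) := by
  induction chunks generalizing S with
  | nil => simp [PySem.Set.update]
  | cons c cs ih =>
    simp only [List.foldl_cons, List.flatMap_cons]
    rw [foldl_mergeLineStep, ih]
    simp [PySem.Set.update, List.foldl_append]

-- A's set-accumulation equals B's selection-by-removal, relative to any accumulator:
-- what the fold appends to s is exactly dedupRemove of the lines not already in s.
theorem foldl_add_eq_dedupRemove (t : List String) (s : PySem.Set String) :
    t.foldl PySem.Set.add s =
      s ++ dedupRemove (t.filter (fun x => !(PySem.Set.contains s x))) := by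
  induction t generalizing s with
  | nil => rw [dedupRemove.eq_def]; simp
  | cons x t ih =>
    simp only [List.foldl_cons, List.filter_cons]
    by_cases hm : x ∈ s
    · have hc : PySem.Set.contains s x = true := by simpa [PySem.Set.contains] using hm
      rw [PySem.Set.add_of_mem hm, hc]
      simpa using ih s
    · have hc : PySem.Set.contains s x = false := by simpa [PySem.Set.contains] using hm
      have hadd : PySem.Set.add s x = s ++ [x] := by
        simp [PySem.Set.add, PySem.Set.contains, hm]
      rw [hadd, hc, ih (s ++ [x])]
      simp only [Bool.not_false, if_true]
      rw [List.append_assoc]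
      congr 1
      rw [dedupRemove, List.filter_filter]
      simp only [List.singleton_append, List.cons.injEq, true_and]
      congr 1
      apply List.filter_congr
      intro a _
      by_cases hax : a = x
      · simp [hax, PySem.Set.contains]
      · simp [PySem.Set.contains, hax]

theorem update_empty_eq_dedupRemove (l : List String) :
    PySem.Set.update (PySem.Set.empty : PySem.Set String) l = dedupRemove l := by
  have h := foldl_add_eq_dedupRemove l (PySem.Set.empty : PySem.Set String)
  simpa [PySem.Set.update, PySem.Set.empty, PySem.Set.contains, List.filter_eq_self] using h

-- ===== VERDICT (by name: the statement is the Claim_ definition above) =====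
theorem merge_all_chunks_py_spec : Claim_equal_merge_all_chunks_py := by
  intro chunks _
  show merge_all_chunks_py chunks = merge_all_chunks_py_alt chunks
  unfold merge_all_chunks_py merge_all_chunks_py_alt
  have h0 : ((PySem.Set.empty : PySem.Set String), ([] : List String)) =
      ((PySem.Set.empty : PySem.Set String), (PySem.Set.empty : PySem.Set String)) := rfl
  rw [h0, foldl_chunks, update_empty_eq_dedupRemove]
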